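-- pv_equiv track=rewrite | github.com/elikrok/cmmc_tool | scanner/config_checker.py | _find_dmz_interfaces
-- ===== SOURCE A (Python) =====
-- def _find_dmz_interfaces(lines):
--     dmz_ifaces = set()
--     current_if = None
--     for raw in lines:
--         low = raw.rstrip().lower()
--         if low.startswith(('interface ', 'ethernet', 'vlan')):
--             current_if = raw.strip()
--         if current_if and (' dmz' in low or low.endswith(' dmz') or 'description dmz' in low or ' name dmz' in low):
--             dmz_ifaces.add(current_if)
--         if current_if and ('dmz' in current_if.lower()):
--             dmz_ifaces.add(current_if)
--     return dmz_ifaces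
-- ===== SOURCE B (Python) =====
-- def _is_dmz_marker(raw):
--     low = raw.rstrip().lower()
--     return ' dmz' in low or low.endswith(' dmz') or 'description dmz' in low or ' name dmz' in low
--
--
-- def _is_section_header(raw):
--     low = raw.rstrip().lower()
--     return low.startswith(('interface ', 'ethernet', 'vlan'))
--
--
-- def _find_dmz_interfaces(lines):
--     # phase 1: group the lines into interface sections (lines before any header belong to none)
--     sections = []
--     current = None
--     for raw in lines:
--         if _is_section_header(raw):
--             if current is not None:
--                 sections.append(current)
--             current = (raw.strip(), [raw])
--         elif current is not None:
--             current[1].append(raw)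
--     if current is not None:
--         sections.append(current)
--     # phase 2: a section is DMZ if its name mentions dmz or any of its lines carries a dmz marker
--     result = set()
--     for header, body in sections:
--         if 'dmz' in header.lower() or any(_is_dmz_marker(line) for line in body):
--             result.add(header)
--     return result
-- ===== Notes on version B (the rewrite author's own statement) =====
-- stated objective: alternative
-- what changed: A's single stateful pass (tracking current_if and adding to the set line by line) is replaced by a two-phase decomposition: first group the lines into (header, body) interface sections, then judge each whole section once (header name mentions dmz, or some section line carries a dmz marker).
import Mathlib
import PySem

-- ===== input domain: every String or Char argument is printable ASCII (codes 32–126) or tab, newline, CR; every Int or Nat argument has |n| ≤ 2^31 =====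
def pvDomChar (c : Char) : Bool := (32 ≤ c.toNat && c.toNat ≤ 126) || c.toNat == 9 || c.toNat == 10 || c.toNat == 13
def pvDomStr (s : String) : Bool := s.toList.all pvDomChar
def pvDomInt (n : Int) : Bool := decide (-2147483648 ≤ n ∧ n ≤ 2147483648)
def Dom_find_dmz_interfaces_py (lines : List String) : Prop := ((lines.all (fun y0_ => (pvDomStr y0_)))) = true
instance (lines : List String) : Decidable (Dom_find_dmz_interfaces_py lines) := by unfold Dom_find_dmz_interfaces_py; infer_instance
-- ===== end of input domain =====

-- B re-implements A as a two-phase pass (group lines into interface sections, then judge each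
-- section once); same return value, objective: alternative decomposition (no speed claim).

-- ===== PORT A =====
-- one iteration of A's single for-loop: state = (dmz_ifaces, current_if)
def pvAstep (st : PySem.Set String × Option String) (raw : String) : PySem.Set String × Option String :=
  let low := PySem.Str.lower (PySem.Str.rstrip raw)
  let cur : Option String :=
    if (PySem.Str.startswith low "interface " || PySem.Str.startswith low "ethernet" ||
        PySem.Str.startswith low "vlan") then some (PySem.Str.strip raw) else st.2
  let s1 :=
    match cur with
    | some h =>
        if (h != "") && (PySem.Str.isIn " dmz" low || PySem.Str.endswith low " dmz" ||
            PySem.Str.isIn "description dmz" low || PySem.Str.isIn " name dmz" low)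
        then PySem.Set.add st.1 h else st.1
    | none => st.1
  let s2 :=
    match cur with
    | some h => if (h != "") && PySem.Str.isIn "dmz" (PySem.Str.lower h) then PySem.Set.add s1 h else s1
    | none => s1
  (s2, cur)

def find_dmz_interfaces_py (lines : List String) : List String :=
  (lines.foldl pvAstep (PySem.Set.empty, none)).1

-- ===== PORT B =====
def pvIsDmzMarker (raw : String) : Bool :=
  let low := PySem.Str.lower (PySem.Str.rstrip raw)
  PySem.Str.isIn " dmz" low || PySem.Str.endswith low " dmz" ||
    PySem.Str.isIn "description dmz" low || PySem.Str.isIn " name dmz" low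

def pvIsSectionHeader (raw : String) : Bool :=
  let low := PySem.Str.lower (PySem.Str.rstrip raw)
  PySem.Str.startswith low "interface " || PySem.Str.startswith low "ethernet" ||
    PySem.Str.startswith low "vlan"

-- phase 1 of B: group the lines into (header, body) sections; 'cur' is the open section
def pvBuildSections : List String → Option (String × List String) → List (String × List String)
  | [], cur => (match cur with | none => [] | some sec => [sec])
  | raw :: tl, cur =>
      if pvIsSectionHeader raw then
        (match cur with | none => [] | some sec => [sec]) ++
          pvBuildSections tl (some (PySem.Str.strip raw, [raw]))
      else
        match cur with
        | none => pvBuildSections tl none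
        | some sec => pvBuildSections tl (some (sec.1, sec.2 ++ [raw]))

-- phase 2 of B: one section's membership test
def pvBstep (s : PySem.Set String) (sec : String × List String) : PySem.Set String :=
  if PySem.Str.isIn "dmz" (PySem.Str.lower sec.1) || sec.2.any pvIsDmzMarker
  then PySem.Set.add s sec.1 else s

def find_dmz_interfaces_py_alt (lines : List String) : List String :=
  (pvBuildSections lines none).foldl pvBstep PySem.Set.empty

-- ===== PRECONDITION & SPEC =====
def Spec_find_dmz_interfaces_py (lines : List String) (out : List String) : Prop := out = find_dmz_interfaces_py_alt lines
instance (lines : List String) (out : List String) : Decidable (Spec_find_dmz_interfaces_py lines out) := by unfold Spec_find_dmz_interfaces_py; infer_instance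

-- ===== CLAIM (what is proved, stated in full; the proofs are below) =====
def Claim_equal_find_dmz_interfaces_py : Prop := ∀ (lines : List String), Dom_find_dmz_interfaces_py lines → Spec_find_dmz_interfaces_py lines (find_dmz_interfaces_py lines)

-- ===== LEMMAS AND PROOFS =====

-- a Python-truthy header name: a line recognised as a section header has a nonempty strip()
lemma pv_lowerChar_eq_self_of_isspace {c : Char} (h : PySem.Chars.isspace c = true) :
    PySem.Chars.lowerChar c = c := by
  unfold PySem.Chars.lowerChar
  rw [if_neg]
  intro hup
  unfold PySem.Chars.isupper at hup
  unfold PySem.Chars.isspace at h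
  simp only [Bool.and_eq_true, decide_eq_true_eq, Char.le_def] at hup
  simp only [Bool.or_eq_true, Bool.and_eq_true, decide_eq_true_eq] at h
  have h1' : 65 ≤ c.toNat := by exact_mod_cast UInt32.le_iff_toNat_le.mp hup.1
  have h2' : c.toNat ≤ 90 := by exact_mod_cast UInt32.le_iff_toNat_le.mp hup.2
  omega

lemma pv_rstrip_prefix (cs : List Char) : PySem.Chars.rstrip cs <+: cs := by
  unfold PySem.Chars.rstrip
  obtain ⟨t, ht⟩ := List.dropWhile_suffix (p := PySem.Chars.isspace) (l := cs.reverse)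
  exact ⟨t.reverse, by rw [← List.reverse_append, ht, List.reverse_reverse]⟩

lemma pv_strip_of_startswith (cs : List Char) (hp : Char) (p' : List Char)
    (hsp : PySem.Chars.isspace hp = false)
    (h : PySem.Chars.startswith (PySem.Chars.lower (PySem.Chars.rstrip cs)) (hp :: p') = true) :
    PySem.Chars.strip cs ≠ [] := by
  rw [PySem.Chars.startswith_iff] at h
  rcases hl : PySem.Chars.rstrip cs with _ | ⟨c0, l''⟩
  · rw [hl] at h; simp [PySem.Chars.lower] at h
  · rw [hl] at h
    have hlow : PySem.Chars.lowerChar c0 = hp := by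
      simp [PySem.Chars.lower, List.cons_prefix_cons] at h
      exact h.1.symm
    have hc0 : PySem.Chars.isspace c0 = false := by
      by_cases hs : PySem.Chars.isspace c0 = true
      · rw [pv_lowerChar_eq_self_of_isspace hs] at hlow
        rw [hlow] at hs; rw [hs] at hsp; exact absurd hsp (by simp)
      · simpa using hs
    obtain ⟨t, ht⟩ := pv_rstrip_prefix cs
    rw [hl] at ht
    have hcs : cs = c0 :: (l'' ++ t) := by rw [← ht]; rfl
    have hls : PySem.Chars.lstrip cs = cs := by
      rw [hcs]; simp [PySem.Chars.lstrip, hc0]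
    unfold PySem.Chars.strip
    rw [hls, hl]
    simp

lemma pv_header_strip_ne (raw : String) (h : pvIsSectionHeader raw = true) :
    PySem.Str.strip raw ≠ "" := by
  intro he
  have hto := congrArg String.toList he
  simp only [PySem.Str.toList_strip] at hto
  simp only [pvIsSectionHeader, Bool.or_eq_true] at h
  have hto' : PySem.Chars.strip raw.toList = [] := by simpa using hto
  rcases h with (h | h) | h
  · have hc : PySem.Chars.startswith (PySem.Chars.lower (PySem.Chars.rstrip raw.toList)) ("interface ".toList) = true := by
      simpa [PySem.Str.startswith, PySem.Str.toList_lower, PySem.Str.toList_rstrip] using h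
    have hcons : "interface ".toList = 'i' :: "nterface ".toList := by decide
    rw [hcons] at hc
    exact pv_strip_of_startswith raw.toList 'i' _ (by decide) hc hto'
  · have hc : PySem.Chars.startswith (PySem.Chars.lower (PySem.Chars.rstrip raw.toList)) ("ethernet".toList) = true := by
      simpa [PySem.Str.startswith, PySem.Str.toList_lower, PySem.Str.toList_rstrip] using h
    have hcons : "ethernet".toList = 'e' :: "thernet".toList := by decide
    rw [hcons] at hc
    exact pv_strip_of_startswith raw.toList 'e' _ (by decide) hc hto'
  · have hc : PySem.Chars.startswith (PySem.Chars.lower (PySem.Chars.rstrip raw.toList)) ("vlan".toList) = true := by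
      simpa [PySem.Str.startswith, PySem.Str.toList_lower, PySem.Str.toList_rstrip] using h
    have hcons : "vlan".toList = 'v' :: "lan".toList := by decide
    rw [hcons] at hc
    exact pv_strip_of_startswith raw.toList 'v' _ (by decide) hc hto'

-- merging two consecutive guarded adds of the same element
lemma pv_add_if_if (s : PySem.Set String) (h : String) (p q : Bool) :
    (if q then PySem.Set.add (if p then PySem.Set.add s h else s) h
     else (if p then PySem.Set.add s h else s)) = if p || q then PySem.Set.add s h else s := by
  cases p <;> cases q <;> simp

-- one step of A's loop, evaluated on a header line / inside a section / before any section
lemma pvAstep_header (st : PySem.Set String × Option String) (raw : String)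
    (hh : pvIsSectionHeader raw = true) (hne : (PySem.Str.strip raw != "") = true) :
    pvAstep st raw =
      ((if PySem.Str.isIn "dmz" (PySem.Str.lower (PySem.Str.strip raw)) || pvIsDmzMarker raw
        then PySem.Set.add st.1 (PySem.Str.strip raw) else st.1), some (PySem.Str.strip raw)) := by
  simp only [pvIsSectionHeader] at hh
  simp only [pvAstep, pvIsDmzMarker, hh, if_true, hne, Bool.true_and]
  rw [pv_add_if_if, Bool.or_comm]
  rfl

lemma pvAstep_mid (S : PySem.Set String) (h : String) (raw : String)
    (hh : pvIsSectionHeader raw = false) (hne : (h != "") = true) :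
    pvAstep (S, some h) raw =
      ((if PySem.Str.isIn "dmz" (PySem.Str.lower h) || pvIsDmzMarker raw
        then PySem.Set.add S h else S), some h) := by
  simp only [pvIsSectionHeader] at hh
  simp only [pvAstep, pvIsDmzMarker, hh, Bool.false_eq_true, if_false, hne, Bool.true_and]
  rw [pv_add_if_if, Bool.or_comm]
  rfl

lemma pvAstep_none (S : PySem.Set String) (raw : String)
    (hh : pvIsSectionHeader raw = false) :
    pvAstep (S, none) raw = (S, none) := by
  simp only [pvIsSectionHeader] at hh
  simp only [pvAstep, hh, Bool.false_eq_true, if_false]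

-- A's loop inside an open section equals B's fold over that section closed with the rest
lemma pv_loop_sec : ∀ (tl : List String) (S : PySem.Set String) (h : String) (body : List String),
    h ≠ "" →
    (tl.foldl pvAstep
        ((if PySem.Str.isIn "dmz" (PySem.Str.lower h) || body.any pvIsDmzMarker
          then PySem.Set.add S h else S), some h)).1
      = (pvBuildSections tl (some (h, body))).foldl pvBstep S := by
  intro tl
  induction tl with
  | nil =>
    intro S h body _
    simp [pvBuildSections, pvBstep]
  | cons raw tl ih =>
    intro S h body hne
    by_cases hh : pvIsSectionHeader raw = true
    · rw [List.foldl_cons, pvAstep_header _ _ hh (bne_iff_ne.mpr (pv_header_strip_ne raw hh))]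
      have hrhs : pvBuildSections (raw :: tl) (some (h, body))
          = (h, body) :: pvBuildSections tl (some (PySem.Str.strip raw, [raw])) := by
        simp [pvBuildSections, hh]
      rw [hrhs, List.foldl_cons]
      have hB : pvBstep S (h, body)
          = (if PySem.Str.isIn "dmz" (PySem.Str.lower h) || body.any pvIsDmzMarker
             then PySem.Set.add S h else S) := rfl
      rw [hB]
      have := ih (if PySem.Str.isIn "dmz" (PySem.Str.lower h) || body.any pvIsDmzMarker
             then PySem.Set.add S h else S) (PySem.Str.strip raw) [raw] (pv_header_strip_ne raw hh)
      simpa using this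
    · rw [Bool.not_eq_true] at hh
      rw [List.foldl_cons, pvAstep_mid _ _ _ hh (bne_iff_ne.mpr hne)]
      have hrhs : pvBuildSections (raw :: tl) (some (h, body))
          = pvBuildSections tl (some (h, body ++ [raw])) := by
        simp [pvBuildSections, hh]
      rw [hrhs]
      rw [pv_add_if_if]
      have hcond : ((PySem.Str.isIn "dmz" (PySem.Str.lower h) || body.any pvIsDmzMarker)
            || (PySem.Str.isIn "dmz" (PySem.Str.lower h) || pvIsDmzMarker raw))
          = (PySem.Str.isIn "dmz" (PySem.Str.lower h) || (body ++ [raw]).any pvIsDmzMarker) := by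
        cases PySem.Str.isIn "dmz" (PySem.Str.lower h) <;>
          cases hb : body.any pvIsDmzMarker <;> simp [List.any_append, hb]
      rw [hcond]
      exact ih S h (body ++ [raw]) hne

-- A's loop before any header line equals B's fold over the sections of the rest
lemma pv_loop_none : ∀ (lines : List String) (S : PySem.Set String),
    (lines.foldl pvAstep (S, none)).1 = (pvBuildSections lines none).foldl pvBstep S := by
  intro lines
  induction lines with
  | nil => intro S; simp [pvBuildSections]
  | cons raw tl ih =>
    intro S
    by_cases hh : pvIsSectionHeader raw = true
    · rw [List.foldl_cons, pvAstep_header _ _ hh (bne_iff_ne.mpr (pv_header_strip_ne raw hh))]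
      have hrhs : pvBuildSections (raw :: tl) none
          = pvBuildSections tl (some (PySem.Str.strip raw, [raw])) := by
        simp [pvBuildSections, hh]
      rw [hrhs]
      have := pv_loop_sec tl S (PySem.Str.strip raw) [raw] (pv_header_strip_ne raw hh)
      simpa using this
    · rw [Bool.not_eq_true] at hh
      rw [List.foldl_cons, pvAstep_none _ _ hh]
      have hrhs : pvBuildSections (raw :: tl) none = pvBuildSections tl none := by
        simp [pvBuildSections, hh]
      rw [hrhs]
      exact ih S

-- ===== VERDICT (by name: the statement is the Claim_ definition above) =====
theorem find_dmz_interfaces_py_spec : Claim_equal_find_dmz_interfaces_py := by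
  intro lines _
  unfold Spec_find_dmz_interfaces_py find_dmz_interfaces_py find_dmz_interfaces_py_alt
  exact pv_loop_none lines PySem.Set.empty
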